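-- pv_equiv track=rewrite | github.com/tara0017/Wordle | wordle.py | get_words_in_order
-- ===== SOURCE A (Python) =====
-- def rescore(dict_of_words):
--     local_letter_count = dict()
--
--     # get adjusted letter count based on remaining words
--     for word in dict_of_words:
--         for c in word:
--             if c in local_letter_count:
--                 local_letter_count[c] += 1
--             else:
--                 local_letter_count[c] = 1
--
--     # rescore each word
--     adjusted_dict = dict()
--     for word in dict_of_words:
--         score = 0
--         for letter in word:
--             score += local_letter_count[letter]
--         adjusted_dict[word] = score
--
--     return adjusted_dict
--
-- def get_words_in_order(order, w):
--
--     for i in range(5):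
--         updated_dict = dict()
--         if order[i] == '-':
--             continue
--         else:
--             letter = order[i].lower()
--             for word in w:
--                 if word[i] == letter:
--                     updated_dict[word] = 0
--             w = updated_dict
--
--     w = rescore(w)
--     return w
-- ===== SOURCE B (Python) =====
-- def get_words_in_order(order, w):
--     # One pass over w: a word survives iff it matches every fixed (non '-') position,
--     # checked in ascending order; then rescore with a single letter counter.
--     checks = [(i, order[i].lower()) for i in range(5) if order[i] != '-']
--     survivors = []
--     for word in w:
--         keep = True
--         for i, letter in checks:
--             if i >= len(word) or word[i] != letter:
--                 keep = False
--                 break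
--         if keep:
--             survivors.append(word)
--     counts = {}
--     for word in survivors:
--         for c in word:
--             counts[c] = counts.get(c, 0) + 1
--     return {word: sum(counts[c] for c in word) for word in survivors}
-- ===== Notes on version B (the rewrite author's own statement) =====
-- stated objective: simpler
-- what changed: B filters in one pass over the words (each word checked against a precomputed list of fixed positions, short-circuiting in ascending order) instead of A's five sequential passes each rebuilding an intermediate dict, and rescoring uses a get-with-default counter and a sum over the word; Pre_ additionally excludes association lists with duplicate keys, which cannot arise from A's Python dict argument.
-- crash fix: On inputs with len(order) >= 5 where some word that matches all earlier fixed positions is shorter than a later checked position, A raises IndexError on word[i]; B treats the short word as a non-match and returns the rescored survivors. — e.g. on get_words_in_order("a----", [("", 0)]): A raises IndexError, B returns []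
import Mathlib
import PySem

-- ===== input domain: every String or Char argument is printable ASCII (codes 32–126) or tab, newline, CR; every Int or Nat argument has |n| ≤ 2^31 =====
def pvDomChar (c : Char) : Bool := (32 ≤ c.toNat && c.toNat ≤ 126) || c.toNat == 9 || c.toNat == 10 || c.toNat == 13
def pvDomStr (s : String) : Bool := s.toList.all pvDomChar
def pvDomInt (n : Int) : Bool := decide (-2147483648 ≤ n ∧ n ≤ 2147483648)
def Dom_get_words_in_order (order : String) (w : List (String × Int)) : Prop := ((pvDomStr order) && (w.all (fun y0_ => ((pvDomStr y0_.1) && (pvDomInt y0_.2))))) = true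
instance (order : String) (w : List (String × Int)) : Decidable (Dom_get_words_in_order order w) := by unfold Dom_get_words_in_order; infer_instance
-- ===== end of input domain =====

-- B replaces A's five sequential dict-rebuilding filter passes by ONE pass over w (all position
-- checks per word, short-circuiting in ascending order) and A's membership-tested counting by a
-- counter built with get-with-default; return values only (no argument is mutated).

-- ===== PORT A =====
-- one iteration of A's `for i in range(5)` loop (the body of the filter loop)
def pvStepA (ow : List Char) (w : List (String × Int)) (i : Int) : List (String × Int) :=
  match PySem.List.pyGet? ow i with
  | none => w            -- Python raises IndexError on order[i] here; excluded by Pre_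
  | some oc =>
    if oc = '-' then w
    else
      (w.foldl (fun (d : PySem.Dict String Int) p =>
          match PySem.List.pyGet? p.1.toList i with
          | none => d    -- Python raises IndexError on word[i] here; excluded by Pre_
          | some c => if c = PySem.Chars.lowerChar oc then d.insert p.1 0 else d)
        PySem.Dict.empty).items

-- A's helper `rescore`
def pvRescore (l : List (String × Int)) : List (String × Int) :=
  let counts := l.foldl (fun (d : PySem.Dict Char Int) p =>
      p.1.toList.foldl (fun d c => if d.contains c then d.modify c 0 (· + 1) else d.insert c 1) d)
    PySem.Dict.empty
  -- `local_letter_count[letter]` never misses (letters come from the same words): getD 0 is exact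
  (l.foldl (fun (ad : PySem.Dict String Int) p =>
      ad.insert p.1 (p.1.toList.foldl (fun s c => s + counts.getD c 0) 0))
    PySem.Dict.empty).items

def get_words_in_order (order : String) (w : List (String × Int)) : List (String × Int) :=
  pvRescore ((PySem.List.pyRange 0 5 1).foldl (pvStepA order.toList) w)

-- ===== PORT B =====
def get_words_in_order_alt (order : String) (w : List (String × Int)) : List (String × Int) :=
  let ow := order.toList
  let checks := (PySem.List.pyRange 0 5 1).foldl (fun acc i =>
      match PySem.List.pyGet? ow i with
      | none => acc      -- Python raises IndexError on order[i] here; excluded by Pre_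
      | some oc => if oc = '-' then acc else acc ++ [(i, PySem.Chars.lowerChar oc)])
    ([] : List (Int × Char))
  let survivors := w.filter (fun p => checks.all (fun ic =>
      match PySem.List.pyGet? p.1.toList ic.1 with
      | none => false    -- `i >= len(word)` in Source B (i from range(5) is never negative): exact
      | some c => c == ic.2))
  let counts := survivors.foldl (fun (d : PySem.Dict Char Int) p =>
      p.1.toList.foldl (fun d c => d.insert c (d.getD c 0 + 1)) d) PySem.Dict.empty
  (survivors.foldl (fun (ad : PySem.Dict String Int) p =>
      ad.insert p.1 ((p.1.toList.map (fun c => counts.getD c 0)).sum)) PySem.Dict.empty).items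

-- ===== PRECONDITION & SPEC =====
-- `word` passes A's position check number n (vacuously true where order[n] is '-' or out of range)
def pvPass1 (ow : List Char) (n : Nat) (s : String) : Bool :=
  match ow[n]? with
  | none => true
  | some oc =>
    if oc = '-' then true
    else
      match s.toList[n]? with
      | none => false
      | some c => c == PySem.Chars.lowerChar oc

def pvPassUpTo (ow : List Char) (n : Nat) (s : String) : Bool :=
  (List.range n).all (fun j => pvPass1 ow j s)

-- Pre_ excludes exactly the inputs where Python A raises IndexError (len(order) < 5, or a word
-- surviving all earlier position checks is too short at a later checked position), and lists with
-- duplicate keys, which cannot arise from A's Python dict argument.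
def Pre_get_words_in_order (order : String) (w : List (String × Int)) : Prop :=
  5 ≤ order.toList.length ∧ (w.map (fun p => p.1)).Nodup ∧
  ∀ p ∈ w, ∀ n : Nat, n < 5 → order.toList[n]? ≠ some '-' →
    pvPassUpTo order.toList n p.1 = true → n < p.1.toList.length
instance (order : String) (w : List (String × Int)) : Decidable (Pre_get_words_in_order order w) := by
  unfold Pre_get_words_in_order; infer_instance

def pvWitness_get_words_in_order : String × (List (String × Int)) :=
  ("ab-cd", [("abxcd", 1), ("q", 2)])

-- On inputs with len(order) ≥ 5 where some word surviving all earlier position checks is shorter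
-- than a later checked position, A raises IndexError while B simply treats the short word as a
-- non-match and returns the rescored survivors (theorem get_words_in_order_raises at the bottom).
def Raises_get_words_in_order (order : String) (w : List (String × Int)) : Prop :=
  5 ≤ order.toList.length ∧ ∃ p ∈ w, ∃ n : Nat, n < 5 ∧ order.toList[n]? ≠ some '-' ∧
    pvPassUpTo order.toList n p.1 = true ∧ ¬ (n < p.1.toList.length)
instance (order : String) (w : List (String × Int)) : Decidable (Raises_get_words_in_order order w) := by
  unfold Raises_get_words_in_order; infer_instance

def pvRaiseWitness_get_words_in_order : String × (List (String × Int)) := ("a----", [("", 0)])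
def pvRaiseWitnessOut_get_words_in_order : List (String × Int) := []

def Spec_get_words_in_order (order : String) (w : List (String × Int)) (out : List (String × Int)) : Prop := out = get_words_in_order_alt order w
instance (order : String) (w : List (String × Int)) (out : List (String × Int)) : Decidable (Spec_get_words_in_order order w out) := by unfold Spec_get_words_in_order; infer_instance

-- ===== CLAIM (what is proved, stated in full; the proofs are below) =====
def Claim_equal_get_words_in_order : Prop := ∀ (order : String) (w : List (String × Int)), Dom_get_words_in_order order w → Pre_get_words_in_order order w → Spec_get_words_in_order order w (get_words_in_order order w)

def Claim_raises_get_words_in_order : Prop := (∀ (order : String) (w : List (String × Int)), Dom_get_words_in_order order w → Raises_get_words_in_order order w → ¬ Pre_get_words_in_order order w) ∧ (Dom_get_words_in_order (pvRaiseWitness_get_words_in_order.1) (pvRaiseWitness_get_words_in_order.2) ∧ Raises_get_words_in_order (pvRaiseWitness_get_words_in_order.1) (pvRaiseWitness_get_words_in_order.2) ∧ get_words_in_order_alt (pvRaiseWitness_get_words_in_order.1) (pvRaiseWitness_get_words_in_order.2) = pvRaiseWitnessOut_get_words_in_order)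

-- ===== LEMMAS AND PROOFS =====

lemma pvFoldl_if_insert (c : String → Bool) (l : List (String × Int)) :
    ∀ d : PySem.Dict String Int,
      l.foldl (fun d p => if c p.1 then d.insert p.1 (0 : Int) else d) d
        = (l.filter (fun p => c p.1)).foldl (fun d p => d.insert p.1 (0 : Int)) d := by
  induction l with
  | nil => intro d; rfl
  | cons p l ih =>
    intro d
    by_cases h : c p.1 <;> simp [h, ih]

lemma pvStepA_keys (ow : List Char) (n : Nat) (st : List (String × Int))
    (hnd : (st.map (fun p => p.1)).Nodup) :
    (pvStepA ow st (n : Int)).map (fun p => p.1)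
      = (st.map (fun p => p.1)).filter (pvPass1 ow n) := by
  unfold pvStepA
  rw [PySem.List.pyGet?_natCast]
  cases how : ow[n]? with
  | none =>
    have ht : pvPass1 ow n = fun _ => true := funext fun s => by simp [pvPass1, how]
    simp [ht]
  | some oc =>
    by_cases hoc : oc = '-'
    · have ht : pvPass1 ow n = fun _ => true := funext fun s => by simp [pvPass1, how, hoc]
      simp [ht, hoc]
    · simp only [hoc, if_false]
      have hfun : (fun (d : PySem.Dict String Int) (p : String × Int) =>
          match PySem.List.pyGet? p.1.toList (n : Int) with
          | none => d
          | some c => if c = PySem.Chars.lowerChar oc then d.insert p.1 0 else d)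
          = fun d p => if pvPass1 ow n p.1 then d.insert p.1 (0 : Int) else d := by
        funext d p
        rw [PySem.List.pyGet?_natCast]
        cases hg : p.1.toList[n]? with
        | none => simp [pvPass1, how, hoc, hg]
        | some ch => by_cases hc : ch = PySem.Chars.lowerChar oc <;>
            simp [pvPass1, how, hoc, hg, hc]
      rw [hfun, pvFoldl_if_insert]
      have hnd2 : ((st.filter (fun p => pvPass1 ow n p.1)).map (fun p => p.1)).Nodup := by
        have h2 : ((st.map (fun p => p.1)).filter (pvPass1 ow n)).Nodup := hnd.filter _
        rw [List.filter_map] at h2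
        simpa [Function.comp] using h2
      rw [PySem.Dict.items_foldl_insert_fresh _ _ _ _ (by simp) hnd2]
      simp [List.filter_map, Function.comp_def, PySem.Dict.empty]

lemma pvKeysA (ow : List Char) (w : List (String × Int))
    (hnd : (w.map (fun p => p.1)).Nodup) (n : Nat) :
    ((((List.range n).map (Nat.cast : Nat → Int)).foldl (pvStepA ow) w).map (fun p => p.1))
      = (w.map (fun p => p.1)).filter (pvPassUpTo ow n) := by
  induction n with
  | zero =>
    have ht : pvPassUpTo ow 0 = fun _ => true := funext fun s => by simp [pvPassUpTo]
    simp [ht]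
  | succ n ih =>
    rw [List.range_succ, List.map_append, List.foldl_append]
    simp only [List.map_cons, List.map_nil, List.foldl_cons, List.foldl_nil]
    have hst : ((((List.range n).map (Nat.cast : Nat → Int)).foldl (pvStepA ow) w).map
        (fun p => p.1)).Nodup := by rw [ih]; exact hnd.filter _
    rw [pvStepA_keys ow n _ hst, ih, List.filter_filter]
    congr 1
    funext s
    simp [pvPassUpTo, List.range_succ, Bool.and_comm]

lemma pvChecksAll (ow : List Char) (s : String) (ns : List Nat) :
    ∀ acc : List (Int × Char),
      (((ns.map (Nat.cast : Nat → Int)).foldl (fun acc i =>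
          match PySem.List.pyGet? ow i with
          | none => acc
          | some oc => if oc = '-' then acc else acc ++ [(i, PySem.Chars.lowerChar oc)]) acc).all
        (fun ic => match PySem.List.pyGet? s.toList ic.1 with
          | none => false
          | some c => c == ic.2))
      = (acc.all (fun ic => match PySem.List.pyGet? s.toList ic.1 with
          | none => false
          | some c => c == ic.2)
         && ns.all (fun n => pvPass1 ow n s)) := by
  induction ns with
  | nil => simp
  | cons n ns ih =>
    intro acc
    simp only [List.map_cons, List.foldl_cons]
    rw [PySem.List.pyGet?_natCast]
    cases how : ow[n]? with
    | none =>
      rw [ih]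
      have : pvPass1 ow n s = true := by simp [pvPass1, how]
      simp [this]
    | some oc =>
      by_cases hoc : oc = '-'
      · have hred : (match some oc with
          | none => acc
          | some oc => if oc = '-' then acc else acc ++ [((n : Int), PySem.Chars.lowerChar oc)])
          = if oc = '-' then acc else acc ++ [((n : Int), PySem.Chars.lowerChar oc)] := rfl
        rw [hred]
        rw [if_pos hoc, ih]
        have : pvPass1 ow n s = true := by simp [pvPass1, how, hoc]
        simp [this]
      · have hred : (match some oc with
          | none => acc
          | some oc => if oc = '-' then acc else acc ++ [((n : Int), PySem.Chars.lowerChar oc)])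
          = if oc = '-' then acc else acc ++ [((n : Int), PySem.Chars.lowerChar oc)] := rfl
        rw [hred]
        rw [if_neg hoc, ih, List.all_append]
        have hq : (([((n : Int), PySem.Chars.lowerChar oc)]).all
            (fun ic => match PySem.List.pyGet? s.toList ic.1 with
              | none => false
              | some c => c == ic.2)) = pvPass1 ow n s := by
          simp only [List.all_cons, List.all_nil, Bool.and_true]
          rw [PySem.List.pyGet?_natCast]
          cases hg : s.toList[n]? with
          | none => simp [pvPass1, how, hoc, hg]
          | some ch => simp [pvPass1, how, hoc, hg]
        rw [hq]
        simp [Bool.and_assoc]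

def pvCnt (ks : List String) : PySem.Dict Char Int :=
  ks.foldl (fun d s => s.toList.foldl (fun d c => d.modify c 0 (· + 1)) d) PySem.Dict.empty

def pvOut (ks : List String) : List (String × Int) :=
  (ks.foldl (fun (ad : PySem.Dict String Int) s =>
      ad.insert s (s.toList.foldl (fun t c => t + (pvCnt ks).getD c 0) 0))
    PySem.Dict.empty).items

lemma pvCharStepA : (fun (d : PySem.Dict Char Int) (c : Char) =>
    if d.contains c then d.modify c 0 (· + 1) else d.insert c 1)
    = fun d c => d.modify c 0 (· + 1) := by
  funext d c
  cases hc : d.contains c with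
  | true => simp
  | false =>
    simp only [Bool.false_eq_true, if_false]
    show d.insert c 1 = d.insert c ((d.getD c 0) + 1)
    rw [PySem.Dict.getD_of_not_contains d 0 hc]
    norm_num

lemma pvCharStepB : (fun (d : PySem.Dict Char Int) (c : Char) =>
    d.insert c (d.getD c 0 + 1)) = fun d c => d.modify c 0 (· + 1) := rfl

lemma pvRescoreA_out (l : List (String × Int)) :
    pvRescore l = pvOut (l.map (fun p => p.1)) := by
  unfold pvRescore pvOut pvCnt
  rw [pvCharStepA, List.foldl_map, List.foldl_map]

lemma pvScore_eq (counts : PySem.Dict Char Int) (cs : List Char) :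
    (cs.map (fun c => counts.getD c 0)).sum = cs.foldl (fun t c => t + counts.getD c 0) 0 := by
  rw [List.sum_eq_foldl, List.foldl_map]

lemma pvRescoreB_out (l : List (String × Int)) :
    ((l.foldl (fun (ad : PySem.Dict String Int) p =>
        ad.insert p.1 ((p.1.toList.map (fun c =>
          (l.foldl (fun (d : PySem.Dict Char Int) p =>
            p.1.toList.foldl (fun d c => d.insert c (d.getD c 0 + 1)) d)
            PySem.Dict.empty).getD c 0)).sum))
      PySem.Dict.empty).items)
    = pvOut (l.map (fun p => p.1)) := by
  unfold pvOut pvCnt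
  rw [pvCharStepB]
  simp only [pvScore_eq]
  rw [List.foldl_map, List.foldl_map]

theorem get_words_in_order_spec : Claim_equal_get_words_in_order := by
  intro order w _hDom hPre
  obtain ⟨_hlen, hnd, _hshort⟩ := hPre
  unfold Spec_get_words_in_order
  simp only [get_words_in_order, get_words_in_order_alt]
  have hR : PySem.List.pyRange 0 5 1 = (List.range 5).map (Nat.cast : Nat → Int) := by decide
  rw [hR, pvRescoreA_out, pvKeysA order.toList w hnd 5]
  simp only [pvChecksAll, List.all_nil, Bool.true_and]
  have hpt : (fun (p : String × Int) => (List.range 5).all (fun n => pvPass1 order.toList n p.1))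
      = fun p => pvPassUpTo order.toList 5 p.1 := by
    funext p; rw [pvPassUpTo]
  rw [hpt, pvRescoreB_out, List.filter_map]
  rfl

theorem get_words_in_order_raises : Claim_raises_get_words_in_order := by
  unfold Claim_raises_get_words_in_order
  constructor
  · intro order w _hDom hRs hPre
    obtain ⟨_, p, hp, n, hn5, hne, hpass, hlt⟩ := hRs
    exact hlt (hPre.2.2 p hp n hn5 hne hpass)
  · exact ⟨by decide, by decide, by decide⟩

-- self-check of the crash-fix witness: B's port really returns the stated literal there
-- (extracted from get_words_in_order_raises so the reader can cite the value on its own)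
theorem pvRaiseWitnessValue_ok :
    get_words_in_order_alt pvRaiseWitness_get_words_in_order.1 pvRaiseWitness_get_words_in_order.2
      = pvRaiseWitnessOut_get_words_in_order := by
  have h := get_words_in_order_raises
  unfold Claim_raises_get_words_in_order at h
  exact h.2.2.2
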